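-- pv_equiv track=rewrite | github.com/divanvisagie/traveling-santa | python/main.py | find_itineraries
-- ===== SOURCE A (Python) =====
-- CITIES = ["North Pole", "Helsinki", "Oslo", "Stockholm", "Copenhagen", "Berlin"]
--
-- DISTANCES = {
--     (0,1): 10, (0,2): 10, (0,3): 12, (0,4): 14, (0,5): 16,
--     (1,2): 8, (1,3): 4, (1,4): 9, (1,5): 11,
--     (2,3): 4, (2,4): 6, (2,5): 9,
--     (3,4): 5, (3,5): 8,
--     (4,5): 4,
-- }
--
-- def distance(a, b):
--     return DISTANCES.get((min(a,b), max(a,b)))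
--
-- def find_itineraries(dists):
--     solutions = []
--     def dfs(current, remaining, visited, path):
--         if not remaining:
--             solutions.append(path[:])
--             return
--         for next_city in range(len(CITIES)):
--             if next_city not in visited and distance(current, next_city) == remaining[0]:
--                 visited.add(next_city)
--                 path.append(next_city)
--                 dfs(next_city, remaining[1:], visited, path)
--                 path.pop()
--                 visited.remove(next_city)
--     dfs(0, dists, {0}, [])
--     return solutions
-- ===== SOURCE B (Python) =====
-- CITIES = ["North Pole", "Helsinki", "Oslo", "Stockholm", "Copenhagen", "Berlin"]
--
-- DISTANCES = {
--     (0,1): 10, (0,2): 10, (0,3): 12, (0,4): 14, (0,5): 16,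
--     (1,2): 8, (1,3): 4, (1,4): 9, (1,5): 11,
--     (2,3): 4, (2,4): 6, (2,5): 9,
--     (3,4): 5, (3,5): 8,
--     (4,5): 4,
-- }
--
-- def distance(a, b):
--     return DISTANCES.get((min(a,b), max(a,b)))
--
-- def find_itineraries(dists):
--     frontier = [(0, {0}, [])]
--     for d in dists:
--         new_frontier = []
--         for cur, visited, path in frontier:
--             for nc in range(len(CITIES)):
--                 if nc not in visited and distance(cur, nc) == d:
--                     new_frontier.append((nc, visited | {nc}, path + [nc]))
--         frontier = new_frontier
--     return [path for _, _, path in frontier]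
-- ===== Notes on version B (the rewrite author's own statement) =====
-- stated objective: alternative
-- what changed: Replaces the recursive backtracking DFS with mutable shared visited/path state by an iterative breadth-first level expansion: one frontier of immutable (city, visited, path) states is rebuilt per distance value, then the surviving paths are returned.
import Mathlib
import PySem

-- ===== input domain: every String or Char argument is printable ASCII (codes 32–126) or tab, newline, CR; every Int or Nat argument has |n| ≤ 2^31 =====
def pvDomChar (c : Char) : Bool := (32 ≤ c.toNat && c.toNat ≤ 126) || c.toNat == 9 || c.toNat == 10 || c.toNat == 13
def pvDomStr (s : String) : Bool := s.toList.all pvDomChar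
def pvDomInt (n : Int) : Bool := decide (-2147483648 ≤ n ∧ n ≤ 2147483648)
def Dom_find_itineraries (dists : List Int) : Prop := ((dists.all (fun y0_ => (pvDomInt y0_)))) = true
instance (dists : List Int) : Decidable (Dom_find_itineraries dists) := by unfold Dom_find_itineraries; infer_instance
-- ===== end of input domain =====

-- B replaces A's recursive backtracking DFS by an iterative frontier (level-by-level) expansion; alternative decomposition, return value proved equal.

-- ===== PORT A =====
def pyCITIES : List String := ["North Pole", "Helsinki", "Oslo", "Stockholm", "Copenhagen", "Berlin"]

def pyDISTANCES : PySem.Dict (Int × Int) Int := PySem.Dict.ofList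
  [((0,1),10), ((0,2),10), ((0,3),12), ((0,4),14), ((0,5),16),
   ((1,2),8), ((1,3),4), ((1,4),9), ((1,5),11),
   ((2,3),4), ((2,4),6), ((2,5),9),
   ((3,4),5), ((3,5),8),
   ((4,5),4)]

def pyDistance (a b : Int) : Option Int := pyDISTANCES.get? (min a b, max a b)

-- range(len(CITIES)): the city indices as Python ints
def cityRange : List Int := (List.range pyCITIES.length).map (fun n => (n : Int))

-- Python's inner dfs: the `solutions` accumulator models the mutated outer list;
-- visited/path are passed functionally (the Python backtracks them, same values).
def dfsA (current : Int) (remaining : List Int) (visited : PySem.Set Int)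
    (path : List Int) (solutions : List (List Int)) : List (List Int) :=
  match remaining with
  | [] => solutions ++ [path]
  | d :: rest =>
    cityRange.foldl
      (fun sols nc =>
        if ¬ visited.contains nc ∧ pyDistance current nc = some d then
          dfsA nc rest (visited.add nc) (path ++ [nc]) sols
        else sols)
      solutions

def find_itineraries (dists : List Int) : List (List Int) :=
  dfsA 0 dists (PySem.Set.ofList [(0 : Int)]) [] []

-- ===== PORT B =====
-- one frontier state: (current city, visited set, path so far)
def stepB (frontier : List (Int × PySem.Set Int × List Int)) (d : Int) :
    List (Int × PySem.Set Int × List Int) :=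
  frontier.flatMap (fun st =>
    cityRange.filterMap (fun nc =>
      if ¬ st.2.1.contains nc ∧ pyDistance st.1 nc = some d then
        some (nc, st.2.1.add nc, st.2.2 ++ [nc])
      else none))

def find_itineraries_alt (dists : List Int) : List (List Int) :=
  (dists.foldl stepB [((0 : Int), PySem.Set.ofList [(0 : Int)], ([] : List Int))]).map
    (fun st => st.2.2)

-- ===== PRECONDITION & SPEC =====
def Spec_find_itineraries (dists : List Int) (out : List (List Int)) : Prop := out = find_itineraries_alt dists
instance (dists : List Int) (out : List (List Int)) : Decidable (Spec_find_itineraries dists out) := by unfold Spec_find_itineraries; infer_instance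

-- ===== CLAIM (what is proved, stated in full; the proofs are below) =====
def Claim_equal_find_itineraries : Prop := ∀ (dists : List Int), Dom_find_itineraries dists → Spec_find_itineraries dists (find_itineraries dists)

-- ===== LEMMAS AND PROOFS =====

-- generic: a filterMap with an if-some guard, flat-mapped, is a guarded flatMap
theorem filterMap_if_flatMap {A B C : Type} (l : List A) (c : A -> Prop) [DecidablePred c]
    (f : A -> B) (h : B -> List C) :
    (l.filterMap (fun x => if c x then some (f x) else none)).flatMap h
      = l.flatMap (fun x => if c x then h (f x) else []) := by
  induction l with
  | nil => rfl
  | cons a l ih => by_cases hc : c a <;> simp [hc, ih]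

-- generic shape of A's loop: a fold whose body conditionally recurses into an
-- accumulator-appending call is the accumulator plus a guarded flatMap
theorem foldl_if_rec {A B : Type} (l : List A) (c : A -> Prop) [DecidablePred c]
    (F : A -> List B -> List B) (hF : forall x s, F x s = s ++ F x [])
    (init : List B) :
    l.foldl (fun s x => if c x then F x s else s) init
      = init ++ l.flatMap (fun x => if c x then F x [] else []) := by
  induction l generalizing init with
  | nil => simp
  | cons a l ih =>
    by_cases hc : c a
    · simp only [List.foldl_cons, List.flatMap_cons, hc, if_pos]
      rw [ih, hF a init, List.append_assoc]
    · simp only [List.foldl_cons, List.flatMap_cons, hc, if_neg, not_false_iff]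
      rw [ih]; simp

-- A's solutions parameter is a pure accumulator: it is only appended to.
theorem dfsA_acc (current : Int) (remaining : List Int) (visited : PySem.Set Int)
    (path : List Int) (solutions : List (List Int)) :
    dfsA current remaining visited path solutions
      = solutions ++ dfsA current remaining visited path [] := by
  induction remaining generalizing current visited path solutions with
  | nil => simp [dfsA]
  | cons d rest ih =>
    simp only [dfsA]
    rw [foldl_if_rec _ _ _ (fun x s => ih x (visited.add x) (path ++ [x]) s),
        foldl_if_rec _ _ _ (fun x s => ih x (visited.add x) (path ++ [x]) s)]
    simp

-- one DFS level is exactly the flatMap of one frontier-expansion step on a singleton frontier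
theorem dfsA_cons (current d : Int) (rest : List Int) (visited : PySem.Set Int)
    (path : List Int) :
    dfsA current (d :: rest) visited path []
      = (stepB [(current, visited, path)] d).flatMap
          (fun st => dfsA st.1 rest st.2.1 st.2.2 []) := by
  simp only [stepB, List.flatMap_cons, List.flatMap_nil, List.append_nil]
  rw [filterMap_if_flatMap]
  simp only [dfsA]
  rw [foldl_if_rec _ _ _ (fun x s => dfsA_acc x rest (visited.add x) (path ++ [x]) s)]
  simp

-- main invariant: the BFS fold over any frontier computes the concatenated DFS results
theorem fold_eq_dfs (ds : List Int) (F : List (Int × PySem.Set Int × List Int)) :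
    (ds.foldl stepB F).map (fun st => st.2.2)
      = F.flatMap (fun st => dfsA st.1 ds st.2.1 st.2.2 []) := by
  induction ds generalizing F with
  | nil =>
    simp only [List.foldl_nil, dfsA]
    induction F with
    | nil => rfl
    | cons st F ihF => simp [List.flatMap_cons] at ihF ⊢; exact ihF
  | cons d rest ih =>
    rw [List.foldl_cons, ih]
    have hstep : stepB F d = F.flatMap (fun st => stepB [st] d) := by
      simp [stepB]
    rw [hstep, List.flatMap_assoc]
    refine List.flatMap_congr ?_
    intro st _
    exact (dfsA_cons st.1 d rest st.2.1 st.2.2).symm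

-- ===== VERDICT (by name: the statement is the Claim_ definition above) =====
theorem find_itineraries_spec : Claim_equal_find_itineraries := by
  intro dists _
  unfold Spec_find_itineraries find_itineraries find_itineraries_alt
  rw [fold_eq_dfs]
  simp
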